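-- pv_equiv track=rewrite | github.com/5cr4b/crypto_algorithm | process.py | process
-- ===== SOURCE A (Python) =====
-- import math
--
-- def process( p , w , ab):
--     m = math.ceil(math.log(p , 2))
--     t = math.ceil(m / w)
--     lst = []
--     for i in range(t):
--         result = ab // pow( 2  , w * (t -1 -i))
--         lst.append(result)
--         ab_1  = result * pow(2 , w * (t -1 - i))
--         ab = ab - ab_1
--     lst.reverse()
--     return lst
-- ===== SOURCE B (Python) =====
-- def process(p, w, ab):
--     m = (p - 1).bit_length()     # exact ceil(log2(p)) for p >= 1
--     t = -(-m // w)               # exact ceil(m / w)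
--     if t <= 0:
--         return []
--     digits = []
--     for _ in range(t - 1):
--         ab, r = divmod(ab, 1 << w)
--         digits.append(r)
--     digits.append(ab)            # top limb unmasked, as in A
--     return digits
-- ===== Notes on version B (the rewrite author's own statement) =====
-- stated objective: simpler
-- what changed: B replaces A's big-endian peel-off (recomputing pow(2, w*(t-1-i)) and subtracting at every step, then reversing) with a little-endian repeated-divmod loop by the fixed base 2**w that needs no reverse, and computes m with exact integer bit_length instead of float math.log.
-- intended difference: For p = 2**29 or p = 2**31 with w in {1,29} resp. {1,31}, float rounding in math.ceil(math.log(p,2)) makes A use m one too large and emit one extra high limb (e.g. A(2**29,29,5)=[5,0]); B uses the exact m=(p-1).bit_length() and returns the intended t limbs ([5]). — e.g. on process(536870912, 29, 5): A returns [5, 0], B returns [5]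
import Mathlib
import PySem

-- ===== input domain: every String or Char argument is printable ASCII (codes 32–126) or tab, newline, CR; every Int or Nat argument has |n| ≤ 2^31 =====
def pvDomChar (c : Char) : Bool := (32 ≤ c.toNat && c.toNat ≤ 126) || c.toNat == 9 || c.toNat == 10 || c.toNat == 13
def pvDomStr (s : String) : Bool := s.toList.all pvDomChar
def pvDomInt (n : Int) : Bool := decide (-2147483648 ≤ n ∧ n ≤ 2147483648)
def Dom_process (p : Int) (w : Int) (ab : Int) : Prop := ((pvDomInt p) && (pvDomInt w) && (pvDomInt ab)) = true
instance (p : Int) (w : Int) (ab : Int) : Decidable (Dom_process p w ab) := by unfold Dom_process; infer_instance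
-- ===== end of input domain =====

-- B replaces A's big-endian peel-off loop (fresh pow and subtraction each step, then reverse)
-- with a little-endian repeated-divmod loop; objective: simpler. Return value only (no mutation).

-- ===== PORT A =====
-- Hand-port of `math.ceil(math.log(p, 2))`, exact on the domain 1 ≤ p ≤ 2^31 (p ≤ 0 raises
-- ValueError in Python and is excluded by Pre_): the exact value is bit_length(p-1); CPython's
-- float log overshoots the integer result exactly at p = 2^29 and p = 2^31 (checked against
-- CPython at every power of two ≤ 2^31 and on a large random sample of the domain).
def pyCeilLog2 (p : Int) : Int :=
  (PySem.Int.bitLength (p - 1) : Int) + (if p = 2 ^ 29 ∨ p = 2 ^ 31 then 1 else 0)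

-- Hand-port of `math.ceil(m / w)`, exact here: |m| ≤ 33 and |w| ≤ 2^31, so the float quotient
-- rounds to no integer other than the exact ceiling (w = 0 raises and is excluded by Pre_).
def pyCeilDiv (m : Int) (w : Int) : Int := -(PySem.Int.floordiv (-m) w)

-- one iteration of A's loop body, state = (lst, ab); on Pre_ every executed iteration has
-- w * (t - 1 - i) ≥ 0, so `pow(2, ·)` is the integer power and `.toNat` is exact
def stepA (w : Int) (t : Int) (st : List Int × Int) (i : Int) : List Int × Int :=
  let e := (2 : Int) ^ (w * (t - 1 - i)).toNat
  let result := PySem.Int.floordiv st.2 e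
  (st.1 ++ [result], st.2 - result * e)

def process (p : Int) (w : Int) (ab : Int) : List Int :=
  let m := pyCeilLog2 p
  let t := pyCeilDiv m w
  (((PySem.List.pyRange 0 t 1).foldl (stepA w t) ([], ab)).1).reverse

-- ===== PORT B =====
-- Source B's loop: n divmod iterations appending the remainder, then the final quotient appended;
-- `1 << w` is exact as 2^w.toNat since every executed iteration has w ≥ 1
def limbsB : Nat → Int → Int → List Int
  | 0, _, ab => [ab]
  | n + 1, w, ab =>
      let base := (1 : Int) <<< w.toNat
      PySem.Int.mod ab base :: limbsB n w (PySem.Int.floordiv ab base)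

def process_alt (p : Int) (w : Int) (ab : Int) : List Int :=
  let m : Int := PySem.Int.bitLength (p - 1)
  let t := -(PySem.Int.floordiv (-m) w)
  if t ≤ 0 then [] else limbsB (t - 1).toNat w ab

-- ===== PRECONDITION & SPEC =====
-- A raises ValueError (math.log) for p ≤ 0 and ZeroDivisionError for w = 0; it returns on
-- every other input, so Pre_ excludes exactly those.
def Pre_process (p : Int) (w : Int) (ab : Int) : Prop := 1 ≤ p ∧ w ≠ 0
instance (p : Int) (w : Int) (ab : Int) : Decidable (Pre_process p w ab) := by
  unfold Pre_process; infer_instance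

def pvWitness_process : Int × Int × Int := (10, 3, 100)

-- For p = 2^29 or p = 2^31 with w ∈ {1,29} resp. {1,31}, float rounding in
-- math.ceil(math.log(p,2)) makes A use m one too large and emit one extra high limb;
-- B uses the exact m = (p-1).bit_length() and returns the intended t limbs.
def D_process (p : Int) (w : Int) (ab : Int) : Prop :=
  (p = 2 ^ 29 ∧ (w = 1 ∨ w = 29)) ∨ (p = 2 ^ 31 ∧ (w = 1 ∨ w = 31))
instance (p : Int) (w : Int) (ab : Int) : Decidable (D_process p w ab) := by
  unfold D_process; infer_instance

def Spec_process (p : Int) (w : Int) (ab : Int) (out : List Int) : Prop :=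
  ¬ D_process p w ab → out = process_alt p w ab
instance (p : Int) (w : Int) (ab : Int) (out : List Int) : Decidable (Spec_process p w ab out) := by
  unfold Spec_process; infer_instance

def pvDiffWitness_process : Int × Int × Int := (536870912, 29, 5)
def pvDiffWitnessOut_process : (List Int) × (List Int) := ([5, 0], [5])

-- ===== CLAIM (what is proved, stated in full; the proofs are below) =====
def Claim_unchanged_process : Prop := ∀ (p : Int) (w : Int) (ab : Int), Dom_process p w ab → Pre_process p w ab → Spec_process p w ab (process p w ab)
def Claim_changed_process : Prop := Dom_process (pvDiffWitness_process.1) (pvDiffWitness_process.2.1) (pvDiffWitness_process.2.2) ∧ Pre_process (pvDiffWitness_process.1) (pvDiffWitness_process.2.1) (pvDiffWitness_process.2.2) ∧ D_process (pvDiffWitness_process.1) (pvDiffWitness_process.2.1) (pvDiffWitness_process.2.2) ∧ process (pvDiffWitness_process.1) (pvDiffWitness_process.2.1) (pvDiffWitness_process.2.2) = pvDiffWitnessOut_process.1 ∧ process_alt (pvDiffWitness_process.1) (pvDiffWitness_process.2.1) (pvDiffWitness_process.2.2) = pvDiffWitnessOut_process.2 ∧ pvDiffWitnessOut_process.1 ≠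 pvDiffWitnessOut_process.2
def Claim_exact_process : Prop := ∀ (p : Int) (w : Int) (ab : Int), Dom_process p w ab → Pre_process p w ab → D_process p w ab → process p w ab ≠ process_alt p w ab

-- ===== LEMMAS AND PROOFS =====

-- the two t's as standalone terms, for stating lemmas
def tA (p : Int) (w : Int) : Int := pyCeilDiv (pyCeilLog2 p) w
def tB (p : Int) (w : Int) : Int := -(PySem.Int.floordiv (-(PySem.Int.bitLength (p - 1) : Int)) w)

-- proof-side view of A's loop: the list of quotients produced from iteration j on,
-- n = number of remaining iterations (head = highest limb)
def gA (w : Int) : Nat → Int → List Int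
  | 0, _ => []
  | n + 1, ab =>
      let e := (2 : Int) ^ (w * (n : Int)).toNat
      let q := PySem.Int.floordiv ab e
      q :: gA w n (ab - q * e)

-- proof-side view of B's loop with the base precomputed
def L (b : Int) : Nat → Int → List Int
  | 0, ab => [ab]
  | n + 1, ab => (ab % b) :: L b n (ab / b)

lemma pyRange_nil {j t : Int} (h : t ≤ j) : PySem.List.pyRange j t 1 = [] := by
  simp [PySem.List.pyRange]; omega

lemma foldA (n : Nat) : ∀ (w t j : Int) (acc : List Int) (ab : Int), t - j = (n : Int) →
    ((PySem.List.pyRange j t 1).foldl (stepA w t) (acc, ab)).1 = acc ++ gA w n ab := by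
  induction n with
  | zero =>
      intro w t j acc ab h
      rw [pyRange_nil (by omega)]
      simp [gA]
  | succ n ih =>
      intro w t j acc ab h
      rw [PySem.List.pyRange_one_cons (by omega)]
      simp only [List.foldl_cons, stepA]
      have he : t - 1 - j = (n : Int) := by omega
      rw [he, ih w t (j + 1) _ _ (by omega)]
      simp [gA, List.append_assoc]

lemma procA (p w ab : Int) : process p w ab = (gA w (tA p w).toNat ab).reverse := by
  by_cases h : tA p w ≤ 0
  · have h0 : (tA p w).toNat = 0 := by omega
    simp only [process, tA, pyCeilDiv] at *
    rw [pyRange_nil (by omega), h0]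
    simp [gA]
  · simp only [process, tA, pyCeilDiv] at *
    rw [foldA (tA p w).toNat w _ 0 [] ab (by simp only [tA, pyCeilDiv]; omega)]
    simp [tA, pyCeilDiv]

lemma len_gA (w : Int) (n : Nat) : ∀ ab, (gA w n ab).length = n := by
  induction n with
  | zero => intro ab; simp [gA]
  | succ n ih => intro ab; simp [gA, ih]

lemma len_limbsB (n : Nat) (w : Int) : ∀ ab, (limbsB n w ab).length = n + 1 := by
  induction n with
  | zero => intro ab; simp [limbsB]
  | succ n ih => intro ab; simp [limbsB, ih]

lemma limbsB_eq (w : Int) (n : Nat) : ∀ ab,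
    limbsB n w ab = L ((2 : Int) ^ w.toNat) n ab := by
  have hb : (0 : Int) < 2 ^ w.toNat := by positivity
  induction n with
  | zero => intro ab; simp [limbsB, L]
  | succ n ih =>
      intro ab
      simp only [limbsB, L, Int.shiftLeft_eq, one_mul,
        PySem.Int.mod_eq_emod_of_pos hb, PySem.Int.floordiv_eq_ediv_of_pos hb, ih]

lemma emod_mul_ediv {a b c : Int} (hb : 0 < b) :
    (a % (b * c)) / b = (a / b) % c := by
  have h1 : a % (b * c) = a + b * (-(c * (a / b / c))) := by
    rw [Int.emod_def, Int.ediv_ediv_of_nonneg hb.le]; ring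
  rw [h1, Int.add_mul_ediv_left _ _ (by omega : b ≠ 0), Int.emod_def]
  ring

lemma L_split {b : Int} (hb : 0 < b) (n : Nat) : ∀ ab,
    L b (n + 1) ab = L b n (ab % b ^ (n + 1)) ++ [ab / b ^ (n + 1)] := by
  induction n with
  | zero => intro ab; simp [L]
  | succ n ih =>
      intro ab
      have hsplit : b ^ (n + 2) = b * b ^ (n + 1) := by ring
      have h1 : ab % b ^ (n + 2) % b = ab % b :=
        Int.emod_emod_of_dvd ab (by rw [hsplit]; exact Dvd.intro _ rfl)
      have h2 : (ab % b ^ (n + 2)) / b = (ab / b) % b ^ (n + 1) := by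
        rw [hsplit, emod_mul_ediv hb]
      have h3 : ab / b / b ^ (n + 1) = ab / b ^ (n + 2) := by
        rw [Int.ediv_ediv_of_nonneg hb.le, ← hsplit]
      calc L b (n + 2) ab = (ab % b) :: L b (n + 1) (ab / b) := rfl
        _ = (ab % b) :: (L b n ((ab / b) % b ^ (n + 1)) ++ [ab / b / b ^ (n + 1)]) := by rw [ih]
        _ = (ab % b ^ (n + 2) % b) :: (L b n ((ab % b ^ (n + 2)) / b) ++ [ab / b ^ (n + 2)]) := by
              rw [h1, h2, h3]
        _ = L b (n + 1) (ab % b ^ (n + 2)) ++ [ab / b ^ (n + 2)] := rfl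

lemma gA_rev {w : Int} (hw : 1 ≤ w) (n : Nat) : ∀ ab,
    (gA w (n + 1) ab).reverse = limbsB n w ab := by
  have hb : (0 : Int) < 2 ^ w.toNat := by positivity
  have hexp : ∀ k : Nat, (2 : Int) ^ (w * (k : Int)).toNat = ((2 : Int) ^ w.toNat) ^ k := by
    intro k
    rw [← pow_mul]
    congr 1
    conv_lhs => rw [show w = (w.toNat : Int) from (Int.toNat_of_nonneg (by omega)).symm]
    rw [← Int.natCast_mul, Int.toNat_natCast]
  induction n with
  | zero =>
      intro ab
      rw [limbsB_eq w]
      simp [gA, L, PySem.Int.floordiv]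
  | succ n ih =>
      intro ab
      have hpow : (0 : Int) < ((2 : Int) ^ w.toNat) ^ (n + 1) := by positivity
      have hq : PySem.Int.floordiv ab ((2 : Int) ^ (w * ((n : Int) + 1)).toNat)
          = ab / ((2 : Int) ^ w.toNat) ^ (n + 1) := by
        rw [show (w * ((n : Int) + 1)).toNat = (w * ((n + 1 : Nat) : Int)).toNat by push_cast; ring_nf,
          hexp (n + 1), PySem.Int.floordiv_eq_ediv_of_pos hpow]
      have hr : ab - (ab / ((2 : Int) ^ w.toNat) ^ (n + 1)) * ((2 : Int) ^ w.toNat) ^ (n + 1)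
          = ab % ((2 : Int) ^ w.toNat) ^ (n + 1) := by
        rw [Int.emod_def]; ring
      calc (gA w (n + 2) ab).reverse
          = (gA w (n + 1) (ab - PySem.Int.floordiv ab ((2 : Int) ^ (w * ((n : Int) + 1)).toNat)
              * ((2 : Int) ^ (w * ((n : Int) + 1)).toNat))).reverse
            ++ [PySem.Int.floordiv ab ((2 : Int) ^ (w * ((n : Int) + 1)).toNat)] := by
              simp [gA]
        _ = (gA w (n + 1) (ab % ((2 : Int) ^ w.toNat) ^ (n + 1))).reverse
            ++ [ab / ((2 : Int) ^ w.toNat) ^ (n + 1)] := by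
              rw [hq, show (2:Int) ^ (w * ((n : Int) + 1)).toNat = ((2 : Int) ^ w.toNat) ^ (n + 1) from
                (by rw [show (w * ((n : Int) + 1)) = (w * ((n + 1 : Nat) : Int)) by push_cast; ring]; exact hexp (n+1)), hr]
        _ = L ((2 : Int) ^ w.toNat) n (ab % ((2 : Int) ^ w.toNat) ^ (n + 1))
            ++ [ab / ((2 : Int) ^ w.toNat) ^ (n + 1)] := by rw [ih, limbsB_eq w]
        _ = L ((2 : Int) ^ w.toNat) (n + 1) ab := (L_split hb n ab).symm
        _ = limbsB (n + 1) w ab := (limbsB_eq w (n + 1) ab).symm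

lemma altB (p w ab : Int) :
    process_alt p w ab = if tB p w ≤ 0 then [] else limbsB ((tB p w) - 1).toNat w ab := rfl

-- ceiling division is nonpositive when the numerator is nonnegative and the divisor negative
lemma ceil_nonpos {m w : Int} (hm : 0 ≤ m) (hw : w ≤ -1) : -(PySem.Int.floordiv (-m) w) ≤ 0 := by
  have h1 := PySem.Int.floordiv_mul_add_mod (-m) w
  have h2 := PySem.Int.mod_neg_bounds (-m) (by omega : w < 0)
  nlinarith [h1, h2.1, h2.2]

-- ceil((m+1)/w) = ceil(m/w) for w ≥ 2 not dividing m
lemma ceil_succ {m w : Int} (hw : 2 ≤ w) (hnd : ¬ w ∣ m) :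
    PySem.Int.floordiv (-(m + 1)) w = PySem.Int.floordiv (-m) w := by
  have hw0 : (0 : Int) < w := by omega
  rw [PySem.Int.floordiv_eq_ediv_of_pos hw0, PySem.Int.floordiv_eq_ediv_of_pos hw0]
  have h1 := Int.mul_ediv_add_emod (-(m + 1)) w
  have h2 := Int.emod_nonneg (-(m + 1)) (by omega : w ≠ 0)
  have h3 := Int.emod_lt_of_pos (-(m + 1)) hw0
  have hr1 : (-(m + 1)) % w + 1 < w := by
    by_contra hcon
    have heq : (-(m + 1)) % w + 1 = w := by omega
    exact hnd ⟨-((-(m + 1)) / w + 1), by linarith⟩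
  exact ((Int.ediv_emod_unique hw0).mpr ⟨by omega, by omega, hr1⟩).1.symm

-- both ports agree whenever their t's coincide and w ≥ 1
lemma main_pos {p w : Int} (hw : 1 ≤ w) (ht : tA p w = tB p w) (ab : Int) :
    process p w ab = process_alt p w ab := by
  rw [procA, altB, ht]
  by_cases h : tB p w ≤ 0
  · rw [if_pos h, show (tB p w).toNat = 0 by omega]
    simp [gA]
  · rw [if_neg h, show (tB p w).toNat = ((tB p w) - 1).toNat + 1 by omega]
    exact gA_rev hw _ ab

-- both ports return [] when their t's are nonpositive
lemma main_nil {p w : Int} (htA : tA p w ≤ 0) (htB : tB p w ≤ 0) (ab : Int) :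
    process p w ab = process_alt p w ab := by
  rw [procA, altB, if_pos htB, show (tA p w).toNat = 0 by omega]
  simp [gA]

lemma dvd29 {w : Int} (h2 : 2 ≤ w) (h29 : w ≠ 29) : ¬ w ∣ (29 : Int) := by
  intro hd
  have hle : w ≤ 29 := Int.le_of_dvd (by norm_num) hd
  interval_cases w <;> omega
lemma dvd31 {w : Int} (h2 : 2 ≤ w) (h31 : w ≠ 31) : ¬ w ∣ (31 : Int) := by
  intro hd
  have hle : w ≤ 31 := Int.le_of_dvd (by norm_num) hd
  interval_cases w <;> omega

lemma bitLen29 : (PySem.Int.bitLength ((2 : Int) ^ 29 - 1) : Int) = 29 := by decide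
lemma bitLen31 : (PySem.Int.bitLength ((2 : Int) ^ 31 - 1) : Int) = 31 := by decide

lemma bitLen_nonneg (p : Int) : (0 : Int) ≤ (PySem.Int.bitLength (p - 1) : Int) := by positivity

-- ===== VERDICT (by name: the statement is the Claim_ definition above) =====
theorem process_spec : Claim_unchanged_process := by
  intro p w ab _hdom hpre
  obtain ⟨hp, hw⟩ := hpre
  intro hnd
  show process p w ab = process_alt p w ab
  by_cases hbad : p = 2 ^ 29 ∨ p = 2 ^ 31
  · -- p is one of the two float-rounding values: pyCeilLog2 p = bitLength (p-1) + 1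
    have hm1 : pyCeilLog2 p = (PySem.Int.bitLength (p - 1) : Int) + 1 := by
      unfold pyCeilLog2; rw [if_pos hbad]
    rcases (show w < 0 ∨ 0 ≤ w by omega) with hneg | hpos
    · exact main_nil (by
          show -(PySem.Int.floordiv (-(pyCeilLog2 p)) w) ≤ 0
          rw [hm1]
          exact ceil_nonpos (by have := bitLen_nonneg p; omega) (by omega))
        (ceil_nonpos (bitLen_nonneg p) (by omega)) ab
    · have hw1 : 1 ≤ w := by omega
      rcases hbad with h29 | h31
      · have hwne : w ≠ 1 ∧ w ≠ 29 := by
          constructor <;> (intro hh; exact hnd (Or.inl ⟨h29, by omega⟩))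
        have hw2 : 2 ≤ w := by omega
        refine main_pos hw1 ?_ ab
        show pyCeilDiv (pyCeilLog2 p) w = tB p w
        rw [pyCeilDiv, tB, hm1, h29, bitLen29]
        exact congrArg Neg.neg (ceil_succ hw2 (dvd29 hw2 hwne.2))
      · have hwne : w ≠ 1 ∧ w ≠ 31 := by
          constructor <;> (intro hh; exact hnd (Or.inr ⟨h31, by omega⟩))
        have hw2 : 2 ≤ w := by omega
        refine main_pos hw1 ?_ ab
        show pyCeilDiv (pyCeilLog2 p) w = tB p w
        rw [pyCeilDiv, tB, hm1, h31, bitLen31]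
        exact congrArg Neg.neg (ceil_succ hw2 (dvd31 hw2 hwne.2))
  · have hm0 : pyCeilLog2 p = (PySem.Int.bitLength (p - 1) : Int) := by
      unfold pyCeilLog2; rw [if_neg hbad, add_zero]
    have ht : tA p w = tB p w := by rw [tA, pyCeilDiv, hm0, tB]
    rcases (show w < 0 ∨ 0 ≤ w by omega) with hneg | hpos
    · exact main_nil (ht ▸ ceil_nonpos (bitLen_nonneg p) (by omega))
        (ceil_nonpos (bitLen_nonneg p) (by omega)) ab
    · exact main_pos (by omega) ht ab

theorem process_changed : Claim_changed_process := by
  unfold Claim_changed_process; decide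

theorem process_tight : Claim_exact_process := by
  intro p w ab _hdom _hpre hd heq
  have hlenA : (process p w ab).length = (tA p w).toNat := by
    rw [procA]; simp [len_gA]
  have hlen := congrArg List.length heq
  rw [hlenA, altB] at hlen
  rcases hd with ⟨hp, hw⟩ | ⟨hp, hw⟩ <;> subst hp <;> rcases hw with hw | hw <;> subst hw
  · rw [show tA (2 ^ 29) 1 = 30 from by decide, show tB (2 ^ 29) 1 = 29 from by decide] at hlen
    rw [if_neg (by decide)] at hlen
    rw [len_limbsB] at hlen
    omega
  · rw [show tA (2 ^ 29) 29 = 2 from by decide, show tB (2 ^ 29) 29 = 1 from by decide] at hlen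
    rw [if_neg (by decide)] at hlen
    rw [len_limbsB] at hlen
    omega
  · rw [show tA (2 ^ 31) 1 = 32 from by decide, show tB (2 ^ 31) 1 = 31 from by decide] at hlen
    rw [if_neg (by decide)] at hlen
    rw [len_limbsB] at hlen
    omega
  · rw [show tA (2 ^ 31) 31 = 2 from by decide, show tB (2 ^ 31) 31 = 1 from by decide] at hlen
    rw [if_neg (by decide)] at hlen
    rw [len_limbsB] at hlen
    omega
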